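-- pv_equiv track=rewrite | github.com/Eight1911/neural-networks | game-2048/monte-carlo-tree-search/util.py | rcheck
-- ===== SOURCE A (Python) =====
-- def rcheck(row):
--     lo, hi = 3, 2
--     while True:
--         while hi > -1 and not row[hi]: hi -= 1
--         if hi == -1:
--             return False
--         elif not row[lo] or row[lo] == row[hi] or hi < lo - 1:
--             return True
--         else:
--             hi -= 1
--             lo -= 1
-- ===== SOURCE B (Python) =====
-- def rcheck(row):
--     tiles = row[:4]
--     seen = False
--     for v in tiles:
--         if v:
--             seen = True
--         elif seen:
--             return True
--     packed = [v for v in tiles if v]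
--     return any(x == y for x, y in zip(packed, packed[1:]))
-- ===== Notes on version B (the rewrite author's own statement) =====
-- stated objective: simpler
-- what changed: Replaces A's dual-pointer (lo,hi) paired-comparison loop with a single left-to-right gap scan over the first four tiles plus an adjacent-equal check on the packed nonzero tiles.
import Mathlib
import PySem

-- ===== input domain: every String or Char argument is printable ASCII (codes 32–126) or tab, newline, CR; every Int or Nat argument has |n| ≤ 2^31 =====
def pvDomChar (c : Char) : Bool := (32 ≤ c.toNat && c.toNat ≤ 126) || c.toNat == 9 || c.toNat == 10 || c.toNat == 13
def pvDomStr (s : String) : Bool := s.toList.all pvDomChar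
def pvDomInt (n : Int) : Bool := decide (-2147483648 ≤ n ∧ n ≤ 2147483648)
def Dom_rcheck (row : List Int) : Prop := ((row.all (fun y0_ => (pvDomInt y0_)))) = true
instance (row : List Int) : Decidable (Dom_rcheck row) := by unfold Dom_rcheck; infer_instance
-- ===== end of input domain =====

-- B replaces A's dual-pointer paired scan by a gap scan over the first four tiles plus an
-- adjacent-equal test on the packed nonzero tiles (objective: simpler).

-- ===== PORT A =====
-- inner 'while hi > -1 and not row[hi]: hi -= 1' (an out-of-range read exits the loop here;
-- inside Pre_ every read the loop performs is in range)
def rcheckSkip (row : List Int) (hi : Int) : Nat → Int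
  | 0 => hi
  | fuel + 1 =>
    if hi > -1 ∧ PySem.List.pyGet? row hi = some 0 then rcheckSkip row (hi - 1) fuel else hi

-- outer 'while True' loop; it performs at most 4 iterations from (lo,hi)=(3,2) and the inner
-- skip at most 3 steps from hi ≤ 2, so the fuel arguments (4 and 3) only make the recursions
-- total and are never exhausted
def rcheckLoop (row : List Int) (lo hi : Int) : Nat → Bool
  | 0 => false
  | fuel + 1 =>
    let hi' := rcheckSkip row hi 3
    if hi' = -1 then false
    else if PySem.List.pyGet? row lo = some 0
            ∨ PySem.List.pyGet? row lo = PySem.List.pyGet? row hi'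
            ∨ hi' < lo - 1 then true
    else rcheckLoop row (lo - 1) (hi' - 1) fuel

def rcheck (row : List Int) : Bool := rcheckLoop row 3 2 4

-- ===== PORT B =====
-- 'for v in tiles: if v: seen = True; elif seen: return True'
def rcheckGap : List Int → Bool → Bool
  | [], _ => false
  | v :: rest, seen =>
    if v ≠ 0 then rcheckGap rest true
    else if seen then true
    else rcheckGap rest seen

-- 'any(x == y for x, y in zip(packed, packed[1:]))'
def rcheckPair : List Int → Bool
  | x :: y :: rest => x == y || rcheckPair (y :: rest)
  | _ => false

def rcheck_alt (row : List Int) : Bool :=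
  let tiles := PySem.List.slice row none (some 4)
  if rcheckGap tiles false then true
  else rcheckPair (tiles.filter (fun v => v ≠ 0))

-- ===== PRECONDITION & SPEC =====
-- Pre_ is exactly the set of inputs on which Python A returns: rows of length ≥ 4 (A reads
-- only indices 0..3), plus the single shorter row of three zeros, on which A's backward
-- zero-skip reaches -1 before touching index 3; on every other row A raises IndexError.
def Pre_rcheck (row : List Int) : Prop := 4 ≤ row.length ∨ row = [0, 0, 0]
instance (row : List Int) : Decidable (Pre_rcheck row) := by unfold Pre_rcheck; infer_instance
def pvWitness_rcheck : List Int := [2, 2, 0, 4]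

def Spec_rcheck (row : List Int) (out : Bool) : Prop := out = rcheck_alt row
instance (row : List Int) (out : Bool) : Decidable (Spec_rcheck row out) := by unfold Spec_rcheck; infer_instance

-- ===== CLAIM (what is proved, stated in full; the proofs are below) =====
def Claim_equal_rcheck : Prop := ∀ (row : List Int), Dom_rcheck row → Pre_rcheck row → Spec_rcheck row (rcheck row)

-- ===== LEMMAS AND PROOFS =====

theorem pyGet?_cons1 (a b : Int) (l : List Int) : PySem.List.pyGet? (a::b::l) 1 = some b := by
  simp [PySem.List.pyGet?, PySem.List.pyIdx?]

theorem pyGet?_cons2 (a b c : Int) (l : List Int) : PySem.List.pyGet? (a::b::c::l) 2 = some c := by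
  simp [PySem.List.pyGet?, PySem.List.pyIdx?]; rw [if_pos (by omega)]; simp

theorem pyGet?_cons3 (a b c d : Int) (l : List Int) :
    PySem.List.pyGet? (a::b::c::d::l) 3 = some d := by
  simp [PySem.List.pyGet?, PySem.List.pyIdx?]; rw [if_pos (by omega)]; simp

theorem slice_cons4 (a b c d : Int) (l : List Int) :
    PySem.List.slice (a::b::c::d::l) none (some 4) = [a,b,c,d] := by
  simp [PySem.List.slice]

set_option maxHeartbeats 4000000 in
set_option maxRecDepth 8000 in
theorem rcheck_eq_alt_four (a b c d : Int) (t : List Int) :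
    rcheck (a :: b :: c :: d :: t) = rcheck_alt (a :: b :: c :: d :: t) := by
  by_cases ha : a = 0 <;> by_cases hb : b = 0 <;> by_cases hc : c = 0 <;> by_cases hd : d = 0 <;>
    simp [rcheck, rcheckLoop, rcheckSkip, rcheck_alt, rcheckGap, rcheckPair, slice_cons4,
      pyGet?_cons1, pyGet?_cons2, pyGet?_cons3, ha, hb, hc, hd] <;>
    (try (split_ifs <;> simp_all)) <;>
    (try (rw [Bool.eq_iff_iff]; simp only [Bool.or_eq_true,
      decide_eq_true_eq, beq_iff_eq]; omega))

-- ===== VERDICT (by name: the statement is the Claim_ definition above) =====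
theorem rcheck_spec : Claim_equal_rcheck := by
  intro row _ hpre
  unfold Spec_rcheck
  rcases hpre with hlen | hz
  · match row, hlen with
    | a :: b :: c :: d :: t, _ => exact rcheck_eq_alt_four a b c d t
  · subst hz; decide
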